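-- pv_equiv track=rewrite | github.com/plextor15/Szyfry | Hash.py | Adler32
-- ===== SOURCE A (Python) =====
-- def bity(val, ilebit):
--     return val & (2**ilebit - 1)
--
-- def Adler32(stringX):
--     listaX = []
--     for i in stringX:
--         listaX.append(ord(i))
--
--     A = 1
--     B = 0
--     P = 65521
--     for x in listaX:
--         A = (A+x) % P
--         B = (B+A) % P
--     A = bity(A,16)
--     B = bity(B,16)
--     hash = B * 65536 + A
--     hash = bity(hash,32)
--     return hash
-- ===== SOURCE B (Python) =====
-- def Adler32(stringX):
--     vals = [ord(c) for c in stringX]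
--     n = len(vals)
--     s = sum(vals)
--     w = sum((n - k) * v for k, v in enumerate(vals))
--     A = (1 + s) % 65521
--     B = (n + w) % 65521
--     return B * 65536 + A
-- ===== Notes on version B (the rewrite author's own statement) =====
-- stated objective: alternative
-- what changed: Replaced the coupled running accumulators (A feeding B each step, with a modulo per iteration) by two independent closed-form sums -- the plain byte sum and a weighted sum with weights n-k -- reduced modulo 65521 once at the end; the 16/32-bit masks disappear because the reduced values already fit.
import Mathlib
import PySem

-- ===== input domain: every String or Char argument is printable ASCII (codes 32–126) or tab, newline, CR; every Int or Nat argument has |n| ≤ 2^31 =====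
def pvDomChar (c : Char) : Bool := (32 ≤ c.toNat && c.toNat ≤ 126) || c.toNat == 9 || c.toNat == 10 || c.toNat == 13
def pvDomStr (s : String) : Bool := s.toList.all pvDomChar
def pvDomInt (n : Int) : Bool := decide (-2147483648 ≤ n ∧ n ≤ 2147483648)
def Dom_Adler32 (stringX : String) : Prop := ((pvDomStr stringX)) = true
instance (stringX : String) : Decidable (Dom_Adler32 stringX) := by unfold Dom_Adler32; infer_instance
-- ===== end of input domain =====

-- B replaces A's coupled per-iteration accumulators (A feeding B each step, modulo each step)
-- by two independent closed-form sums (byte sum, and a weighted sum with weights n-k) reduced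
-- modulo 65521 once at the end; an alternative of the same cost, not claimed faster.

-- ===== PORT A =====
def bity (val ilebit : Int) : Int := PySem.Int.band val (2 ^ ilebit.toNat - 1)

def Adler32 (stringX : String) : Int :=
  let listaX : List Int := stringX.toList.foldl (fun acc i => acc ++ [(i.toNat : Int)]) []
  let P : Int := 65521
  let AB : Int × Int := listaX.foldl (fun p x =>
      let A := PySem.Int.mod (p.1 + x) P
      let B := PySem.Int.mod (p.2 + A) P
      (A, B)) (1, 0)
  let A := bity AB.1 16
  let B := bity AB.2 16
  let hash := B * 65536 + A
  bity hash 32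

-- ===== PORT B =====
def Adler32_alt (stringX : String) : Int :=
  let vals : List Int := stringX.toList.map (fun c => (c.toNat : Int))
  let n : Int := PySem.List.len vals
  let s : Int := vals.sum
  let w : Int := ((PySem.List.enumerate vals).map (fun kv => (n - kv.1) * kv.2)).sum
  let A := PySem.Int.mod (1 + s) 65521
  let B := PySem.Int.mod (n + w) 65521
  B * 65536 + A

-- ===== PRECONDITION & SPEC =====
def Spec_Adler32 (stringX : String) (out : Int) : Prop := out = Adler32_alt stringX
instance (stringX : String) (out : Int) : Decidable (Spec_Adler32 stringX out) := by unfold Spec_Adler32; infer_instance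

-- ===== CLAIM (what is proved, stated in full; the proofs are below) =====
def Claim_equal_Adler32 : Prop := ∀ (stringX : String), Dom_Adler32 stringX → Spec_Adler32 stringX (Adler32 stringX)

-- ===== LEMMAS AND PROOFS =====

-- weighted sum: wsum [x0, …, x(n-1)] = Σ (n-k) * xk
def wsum : List Int → Int
  | [] => 0
  | x :: r => x * (r.length + 1) + wsum r

lemma fold_eq (xs : List Int) : ∀ a b : Int, a % 65521 = a → b % 65521 = b →
    xs.foldl (fun p x => ((p.1 + x) % 65521, (p.2 + (p.1 + x) % 65521) % 65521)) (a, b) =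
    ((a + xs.sum) % 65521, (b + xs.length * a + wsum xs) % 65521) := by
  induction xs with
  | nil => intro a b ha hb; simp [wsum, ha, hb]
  | cons x r ih =>
    intro a b ha hb
    simp only [List.foldl_cons]
    rw [ih _ _ (Int.emod_emod_of_dvd _ dvd_rfl) (Int.emod_emod_of_dvd _ dvd_rfl)]
    have hmm : ∀ z : Int, z % 65521 ≡ z [ZMOD 65521] := fun z => Int.emod_emod_of_dvd z dvd_rfl
    have ha1 : (a + x) % 65521 ≡ a + x [ZMOD 65521] := hmm _
    refine Prod.ext ?_ ?_
    · show ((a + x) % 65521 + r.sum) % 65521 = (a + (x :: r).sum) % 65521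
      rw [Int.emod_add_emod]; congr 1; simp; ring
    · show ((b + (a + x) % 65521) % 65521 + (r.length:Int) * ((a + x) % 65521) + wsum r) % 65521
        = (b + ((x :: r).length : Int) * a + wsum (x :: r)) % 65521
      have step : ((b + (a + x) % 65521) % 65521 + (r.length:Int) * ((a + x) % 65521) + wsum r)
          ≡ (b + (a + x)) + (r.length:Int) * (a + x) + wsum r [ZMOD 65521] :=
        (((hmm _).trans ((Int.ModEq.refl b).add ha1)).add
          ((Int.ModEq.refl _).mul ha1)).add (Int.ModEq.refl _)
      rw [step]
      congr 1
      simp [wsum]; ring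

lemma enum_wsum (xs : List Int) : ∀ m s : Int, m - s = xs.length →
    ((PySem.List.enumerate xs s).map (fun kv => (m - kv.1) * kv.2)).sum = wsum xs := by
  induction xs with
  | nil => intro m s h; simp [PySem.List.enumerate_nil, wsum]
  | cons x r ih =>
    intro m s h
    simp only [PySem.List.enumerate_cons, List.map_cons, List.sum_cons, wsum]
    rw [ih m (s + 1) (by simp at h; omega)]
    have hm : m - s = (r.length : Int) + 1 := by simp at h; omega
    rw [hm]; ring

lemma mask_id (v : Int) (k : Nat) (h0 : 0 ≤ v) (h : v < 2 ^ k) :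
    PySem.Int.band v (2 ^ k - 1) = v := by
  have hc : ((2:Int) ^ k) = ((2 ^ k : Nat) : Int) := by norm_cast
  have h1 : (0:Int) ≤ 2 ^ k - 1 := by rw [hc]; have := Nat.one_le_two_pow (n := k); omega
  rw [PySem.Int.band_of_nonneg h0 h1]
  have h2t : ((2:Int) ^ k - 1).toNat = 2 ^ k - 1 := by rw [hc]; omega
  rw [h2t, Nat.and_two_pow_sub_one_eq_mod]
  have hlt : v.toNat < 2 ^ k := by rw [hc] at h; omega
  rw [Nat.mod_eq_of_lt hlt, Int.toNat_of_nonneg h0]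

-- ===== VERDICT (by name: the statement is the Claim_ definition above) =====
theorem Adler32_spec : Claim_equal_Adler32 := by
  unfold Claim_equal_Adler32
  intro stringX _
  unfold Spec_Adler32 Adler32 Adler32_alt
  have hP : (0:Int) < 65521 := by norm_num
  simp only [bity, PySem.List.foldl_append_singleton_eq_map, List.nil_append, PySem.List.len_eq,
    PySem.Int.mod_eq_emod_of_pos hP]
  set bs : List Int := stringX.toList.map (fun c => (c.toNat : Int)) with hbs
  rw [fold_eq bs 1 0 (by decide) (by decide)]
  rw [enum_wsum bs (bs.length) 0 (by simp)]
  have hA : (0:Int) ≤ (1 + bs.sum) % 65521 ∧ (1 + bs.sum) % 65521 < 65521 :=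
    ⟨Int.emod_nonneg _ (by norm_num), Int.emod_lt_of_pos _ hP⟩
  have hB : (0:Int) ≤ (0 + (bs.length:Int) * 1 + wsum bs) % 65521 ∧
      (0 + (bs.length:Int) * 1 + wsum bs) % 65521 < 65521 :=
    ⟨Int.emod_nonneg _ (by norm_num), Int.emod_lt_of_pos _ hP⟩
  rw [show ((16:Int).toNat) = 16 from rfl, show ((32:Int).toNat) = 32 from rfl]
  rw [mask_id _ 16 hA.1 (by have := hA.2; norm_num at this ⊢; omega),
      mask_id _ 16 hB.1 (by have := hB.2; norm_num at this ⊢; omega)]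
  rw [mask_id _ 32 (by nlinarith [hA.1, hB.1]) (by nlinarith [hA.2, hB.2, hA.1, hB.1])]
  rw [show (0 + (bs.length:Int) * 1 + wsum bs) = ((bs.length:Int) + wsum bs) from by ring]
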